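-- pv_equiv track=rewrite | github.com/ehauckdo/mario | metrics.py | enemiesAndPowerUps
-- ===== SOURCE A (Python) =====
-- def enemiesAndPowerUps(map_matrix):
-- 	score = 0
-- 	# "L" gives an extra life, but I guess this is not
-- 	# really an advantage for a bot, is it?
-- 	powerups = ["@", "U"]
-- 	enemies = ["g", "E","y","Y","G","k","K","r"]
-- 	score = 0
--
-- 	for line in map_matrix:
-- 		for element in line:
-- 			if element in powerups:
-- 				score += 1
-- 			if element in enemies:
-- 				score -= 1
-- 	return score
-- ===== SOURCE B (Python) =====
-- def enemiesAndPowerUps(map_matrix):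
--     # Tabulate cell frequencies once, then score the known symbols from the table.
--     counts = {}
--     for line in map_matrix:
--         for element in line:
--             counts[element] = counts.get(element, 0) + 1
--     powerups = ["@", "U"]
--     enemies = ["g", "E", "y", "Y", "G", "k", "K", "r"]
--     return sum(counts.get(p, 0) for p in powerups) - sum(counts.get(e, 0) for e in enemies)
-- ===== Notes on version B (the rewrite author's own statement) =====
-- stated objective: idiomatic
-- what changed: Replaces the per-cell membership tests against the symbol lists with a single frequency-table (Counter-style dict) pass over the grid, then a fixed-size lookup pass over the two symbol lists.
import Mathlib
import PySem

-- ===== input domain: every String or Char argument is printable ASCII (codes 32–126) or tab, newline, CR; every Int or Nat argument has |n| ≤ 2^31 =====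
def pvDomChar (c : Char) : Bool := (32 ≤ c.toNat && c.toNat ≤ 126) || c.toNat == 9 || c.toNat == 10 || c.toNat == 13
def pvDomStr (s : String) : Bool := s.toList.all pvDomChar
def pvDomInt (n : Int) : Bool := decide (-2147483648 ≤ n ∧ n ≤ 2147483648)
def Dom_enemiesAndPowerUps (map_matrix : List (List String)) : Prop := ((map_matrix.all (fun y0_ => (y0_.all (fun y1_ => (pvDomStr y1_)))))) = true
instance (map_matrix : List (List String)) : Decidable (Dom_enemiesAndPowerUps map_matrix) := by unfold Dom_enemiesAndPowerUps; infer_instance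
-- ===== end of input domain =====

-- B tabulates cell frequencies into a dict once and scores the two fixed symbol lists from the table,
-- instead of A's per-cell membership tests (objective: idiomatic; same return value).


-- ===== PORT A =====
def enemiesAndPowerUps (map_matrix : List (List String)) : Int :=
  let powerups : List String := ["@", "U"]
  let enemies : List String := ["g", "E", "y", "Y", "G", "k", "K", "r"]
  map_matrix.foldl (fun score line =>
    line.foldl (fun score element =>
      let score := if element ∈ powerups then score + 1 else score
      if element ∈ enemies then score - 1 else score) score) 0

-- ===== PORT B =====
def enemiesAndPowerUps_alt (map_matrix : List (List String)) : Int :=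
  let counts : PySem.Dict String Int :=
    map_matrix.foldl (fun counts line =>
      line.foldl (fun counts element =>
        counts.insert element (counts.getD element 0 + 1)) counts) PySem.Dict.empty
  let powerups : List String := ["@", "U"]
  let enemies : List String := ["g", "E", "y", "Y", "G", "k", "K", "r"]
  (powerups.map (fun p => counts.getD p 0)).sum - (enemies.map (fun e => counts.getD e 0)).sum

-- ===== PRECONDITION & SPEC =====
def Spec_enemiesAndPowerUps (map_matrix : List (List String)) (out : Int) : Prop := out = enemiesAndPowerUps_alt map_matrix
instance (map_matrix : List (List String)) (out : Int) : Decidable (Spec_enemiesAndPowerUps map_matrix out) := by unfold Spec_enemiesAndPowerUps; infer_instance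

-- ===== CLAIM (what is proved, stated in full; the proofs are below) =====
def Claim_equal_enemiesAndPowerUps : Prop := ∀ (map_matrix : List (List String)), Dom_enemiesAndPowerUps map_matrix → Spec_enemiesAndPowerUps map_matrix (enemiesAndPowerUps map_matrix)

-- ===== LEMMAS AND PROOFS =====

-- per-cell score delta of A
def pvF (x : String) : Int :=
  (if x ∈ (["@", "U"] : List String) then 1 else 0)
  - (if x ∈ (["g", "E", "y", "Y", "G", "k", "K", "r"] : List String) then 1 else 0)

theorem pvA_inner (l : List String) (s : Int) :
    l.foldl (fun score element =>
      let score := if element ∈ (["@", "U"] : List String) then score + 1 else score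
      if element ∈ (["g", "E", "y", "Y", "G", "k", "K", "r"] : List String) then score - 1 else score) s
    = s + (l.map pvF).sum := by
  induction l generalizing s with
  | nil => simp
  | cons x xs ih => simp only [List.foldl_cons, List.map_cons, List.sum_cons, ih, pvF]; split_ifs <;> ring

theorem pvA_outer (m : List (List String)) : ∀ (s : Int),
    m.foldl (fun score line =>
      line.foldl (fun score element =>
        let score := if element ∈ (["@", "U"] : List String) then score + 1 else score
        if element ∈ (["g", "E", "y", "Y", "G", "k", "K", "r"] : List String) then score - 1 else score) score) s
    = s + ((m.flatten).map pvF).sum := by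
  induction m with
  | nil => simp
  | cons l ls ih =>
    intro s
    rw [List.foldl_cons, pvA_inner, ih]
    simp only [List.flatten_cons, List.map_append, List.sum_append]
    ring

theorem pvA_eq_flatten (m : List (List String)) :
    enemiesAndPowerUps m = ((m.flatten).map pvF).sum := by
  unfold enemiesAndPowerUps
  rw [pvA_outer]
  simp

-- how each known symbol contributes to A's per-cell delta
theorem pvF_eq (x : String) :
    pvF x = ((if x = "@" then 1 else 0) + (if x = "U" then 1 else 0))
      - ((if x = "g" then 1 else 0) + (if x = "E" then 1 else 0) + (if x = "y" then 1 else 0)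
         + (if x = "Y" then 1 else 0) + (if x = "G" then 1 else 0) + (if x = "k" then 1 else 0)
         + (if x = "K" then 1 else 0) + (if x = "r" then 1 else 0)) := by
  unfold pvF
  by_cases h1 : x = "@"; · subst h1; decide
  by_cases h2 : x = "U"; · subst h2; decide
  by_cases h3 : x = "g"; · subst h3; decide
  by_cases h4 : x = "E"; · subst h4; decide
  by_cases h5 : x = "y"; · subst h5; decide
  by_cases h6 : x = "Y"; · subst h6; decide
  by_cases h7 : x = "G"; · subst h7; decide
  by_cases h8 : x = "k"; · subst h8; decide
  by_cases h9 : x = "K"; · subst h9; decide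
  by_cases h10 : x = "r"; · subst h10; decide
  simp [List.mem_cons, h1, h2, h3, h4, h5, h6, h7, h8, h9, h10]

theorem pvB_counts (m : List (List String)) :
    m.foldl (fun counts line =>
      line.foldl (fun (counts : PySem.Dict String Int) element =>
        counts.insert element (counts.getD element 0 + 1)) counts) PySem.Dict.empty
    = PySem.Dict.counter m.flatten := by
  rw [← PySem.Dict.foldl_insert_getD_add_one_eq_counter, ← List.foldl_flatten]

theorem pvSum_eq_counts (xs : List String) :
    (xs.map pvF).sum
    = (((["@", "U"] : List String).map (fun p => (xs.count p : Int))).sum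
       - ((["g", "E", "y", "Y", "G", "k", "K", "r"] : List String).map (fun e => (xs.count e : Int))).sum) := by
  induction xs with
  | nil => simp
  | cons x xs ih =>
    simp only [List.map_cons, List.sum_cons, List.map_nil, List.sum_nil, List.count_cons,
      beq_iff_eq] at ih ⊢
    rw [pvF_eq]
    push_cast
    rw [ih]
    ring

-- ===== VERDICT (by name: the statement is the Claim_ definition above) =====
theorem enemiesAndPowerUps_spec : Claim_equal_enemiesAndPowerUps := by
  intro m _
  show enemiesAndPowerUps m = enemiesAndPowerUps_alt m
  rw [pvA_eq_flatten, pvSum_eq_counts]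
  unfold enemiesAndPowerUps_alt
  rw [pvB_counts]
  simp [PySem.Dict.getD_counter]
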